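-- pv_equiv track=rewrite | github.com/sparshdubey95/traffic-anomaly2 | traffic-anomaly-detection/app.py | calculate_safety_score
-- ===== SOURCE A (Python) =====
-- def calculate_safety_score(detections, anomalies):
--     """Calculate overall safety score (0-100)"""
--     base_score = 100
--
--     # Deduct points for anomalies
--     for anomaly in anomalies:
--         severity = anomaly.get('severity', 'medium')
--         if severity == 'high':
--             base_score -= 25
--         elif severity == 'medium':
--             base_score -= 10
--         else:
--             base_score -= 5
--
--     # Deduct points for high vehicle density
--     if len(detections) > 10:
--         base_score -= (len(detections) - 10) * 2
--
--     return max(0, base_score)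
-- ===== SOURCE B (Python) =====
-- def calculate_safety_score(detections, anomalies):
--     """Calculate overall safety score (0-100)"""
--     sev = [a.get('severity', 'medium') for a in anomalies]
--     high = sev.count('high')
--     medium = sev.count('medium')
--     deduction = 25 * high + 10 * medium + 5 * (len(sev) - high - medium)
--     density = 2 * max(0, len(detections) - 10)
--     return max(0, 100 - deduction - density)
-- ===== Notes on version B (the rewrite author's own statement) =====
-- stated objective: alternative
-- what changed: Replaces the decrement-inside-loop with a severity tally (map + count) and a closed-form arithmetic expression for both deductions.
import Mathlib
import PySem

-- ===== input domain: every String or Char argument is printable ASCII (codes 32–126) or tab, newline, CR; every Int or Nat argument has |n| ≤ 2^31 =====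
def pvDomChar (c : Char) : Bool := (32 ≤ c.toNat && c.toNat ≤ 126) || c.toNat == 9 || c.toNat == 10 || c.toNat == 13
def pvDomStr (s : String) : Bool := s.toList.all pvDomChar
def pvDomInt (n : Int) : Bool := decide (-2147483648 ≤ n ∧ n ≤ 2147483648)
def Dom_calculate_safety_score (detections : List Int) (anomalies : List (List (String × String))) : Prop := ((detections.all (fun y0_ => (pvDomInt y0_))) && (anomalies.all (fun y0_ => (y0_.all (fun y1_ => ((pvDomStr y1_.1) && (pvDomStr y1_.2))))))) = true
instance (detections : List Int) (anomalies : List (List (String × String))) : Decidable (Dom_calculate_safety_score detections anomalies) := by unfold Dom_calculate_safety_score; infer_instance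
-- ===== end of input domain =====

-- B replaces the decrement-inside-loop with a severity tally and a closed-form deduction (alternative decomposition, same cost).


-- ===== PORT A =====
-- anomaly.get('severity', 'medium') on an association list: first matching key, else default
def pyAssocGetD (d : List (String × String)) (k dflt : String) : String :=
  match d.find? (fun p => p.1 == k) with
  | some p => p.2
  | none => dflt

def calculate_safety_score (detections : List Int) (anomalies : List (List (String × String))) : Int :=
  let base_score : Int := 100
  let base_score := anomalies.foldl (fun b anomaly =>
    let severity := pyAssocGetD anomaly "severity" "medium"
    if severity == "high" then b - 25
    else if severity == "medium" then b - 10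
    else b - 5) base_score
  let base_score :=
    if (detections.length : Int) > 10 then base_score - ((detections.length : Int) - 10) * 2
    else base_score
  max 0 base_score

-- ===== PORT B =====
def calculate_safety_score_alt (detections : List Int) (anomalies : List (List (String × String))) : Int :=
  let sev := anomalies.map (fun a => pyAssocGetD a "severity" "medium")
  let high : Int := PySem.List.count sev "high"
  let medium : Int := PySem.List.count sev "medium"
  let deduction := 25 * high + 10 * medium + 5 * ((sev.length : Int) - high - medium)
  let density := 2 * max 0 ((detections.length : Int) - 10)
  max 0 (100 - deduction - density)

-- ===== PRECONDITION & SPEC =====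
def Spec_calculate_safety_score (detections : List Int) (anomalies : List (List (String × String))) (out : Int) : Prop := out = calculate_safety_score_alt detections anomalies
instance (detections : List Int) (anomalies : List (List (String × String))) (out : Int) : Decidable (Spec_calculate_safety_score detections anomalies out) := by unfold Spec_calculate_safety_score; infer_instance

-- ===== CLAIM (what is proved, stated in full; the proofs are below) =====
def Claim_equal_calculate_safety_score : Prop := ∀ (detections : List Int) (anomalies : List (List (String × String))), Dom_calculate_safety_score detections anomalies → Spec_calculate_safety_score detections anomalies (calculate_safety_score detections anomalies)

-- ===== LEMMAS AND PROOFS =====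
-- The loop of A subtracts exactly the closed-form deduction B computes.
theorem css_foldl_eq (anomalies : List (List (String × String))) (b : Int) :
    anomalies.foldl (fun b anomaly =>
      let severity := pyAssocGetD anomaly "severity" "medium"
      if severity == "high" then b - 25
      else if severity == "medium" then b - 10
      else b - 5) b
    = b - (25 * ((anomalies.map (fun a => pyAssocGetD a "severity" "medium")).count "high" : Int)
         + 10 * ((anomalies.map (fun a => pyAssocGetD a "severity" "medium")).count "medium" : Int)
         + 5 * ((anomalies.length : Int)
              - ((anomalies.map (fun a => pyAssocGetD a "severity" "medium")).count "high" : Int)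
              - ((anomalies.map (fun a => pyAssocGetD a "severity" "medium")).count "medium" : Int))) := by
  induction anomalies generalizing b with
  | nil => simp
  | cons a t ih =>
    simp only [List.foldl_cons, List.map_cons, List.length_cons, ih]
    by_cases h1 : pyAssocGetD a "severity" "medium" = "high"
    · simp [h1]
      ring
    · by_cases h2 : pyAssocGetD a "severity" "medium" = "medium"
      · simp [h2]
        ring
      · simp [h1, h2]
        ring

-- ===== VERDICT (by name: the statement is the Claim_ definition above) =====
theorem calculate_safety_score_spec : Claim_equal_calculate_safety_score := by
  intro detections anomalies _
  unfold Spec_calculate_safety_score calculate_safety_score calculate_safety_score_alt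
  simp only [css_foldl_eq, PySem.List.count_eq, List.length_map]
  split_ifs with h <;> omega
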